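-- pv_equiv track=rewrite | github.com/bnichols108/CodeWars | python/alphabet_position.py | alphabet_position
-- ===== SOURCE A (Python) =====
-- def alphabet_position(text):
--     # Dictionary to hold key:value pairs between alphabet:number
--     alpha_dict = {"a":"1","b":"2","c":"3","d":"4","e":"5","f":"6","g":"7","h":"8","i":"9","j":"10","k":"11","l":"12","m":"13","n":"14","o":"15","p":"16","q":"17","r":"18","s":"19","t":"20","u":"21","v":"22","w":"23","x":"24","y":"25","z":"26",}
--
--     # Empty string variable to return
--     ret = str()
--
--     # For loop to iterate through string argument with lower built-in function
--     for char in text.lower():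
--         # For loop to iterate through the dictionary checking for each alphabet character
--         for key,value in alpha_dict.items():
--             # If conditional to check if current key and value are equal
--             if key == char:
--                 # If true, add the value from the current key pair in the alpha_dict dictionary
--                 ret += value + " "
--
--     # Return the string but remove the last character in the string because it's an empty character
--     return ret[:-1]
-- ===== SOURCE B (Python) =====
-- def alphabet_position(text):
--     return ' '.join(str(ord(c) - 96) for c in text.lower() if 'a' <= c <= 'z')
-- ===== Notes on version B (the rewrite author's own statement) =====
-- stated objective: idiomatic
-- what changed: Replaces the 26-entry dict scan per character with direct ord-arithmetic (ord(c)-96) guarded by 'a'<=c<='z', and replaces string concatenation plus trailing-slice with a single ' '.join over a generator.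
import Mathlib
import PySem

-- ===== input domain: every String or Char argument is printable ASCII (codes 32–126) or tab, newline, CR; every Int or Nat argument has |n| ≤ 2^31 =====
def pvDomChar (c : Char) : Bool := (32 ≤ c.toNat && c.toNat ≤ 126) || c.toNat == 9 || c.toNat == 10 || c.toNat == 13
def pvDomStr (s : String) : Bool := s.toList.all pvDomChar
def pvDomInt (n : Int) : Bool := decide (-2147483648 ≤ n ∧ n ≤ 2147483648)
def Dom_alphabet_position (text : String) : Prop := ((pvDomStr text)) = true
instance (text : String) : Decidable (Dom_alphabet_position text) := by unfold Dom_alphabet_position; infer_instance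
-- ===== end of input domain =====

-- B drops the 26-entry dict scan per character: it computes each position by ord-arithmetic
-- under an explicit 'a'..'z' guard and assembles the result with ' '.join (idiomatic, no trailing-space slice).


-- ===== PORT A =====
-- the dict literal; items() of a literal dict is its pairs in insertion order
def pvAlphaDict : List (String × String) :=
  [("a","1"),("b","2"),("c","3"),("d","4"),("e","5"),("f","6"),("g","7"),("h","8"),
   ("i","9"),("j","10"),("k","11"),("l","12"),("m","13"),("n","14"),("o","15"),("p","16"),
   ("q","17"),("r","18"),("s","19"),("t","20"),("u","21"),("v","22"),("w","23"),("x","24"),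
   ("y","25"),("z","26")]

-- ret is kept as List Char (Python str concatenation); iterating a str yields 1-char strings,
-- so 'key == char' is kv.1 == String.ofList [ch]; final ret[:-1] is a slice with stop -1
def alphabet_position (text : String) : String :=
  let ret : List Char :=
    (PySem.Str.lower text).toList.foldl (fun ret ch =>
      pvAlphaDict.foldl (fun ret kv =>
        if kv.1 == String.ofList [ch] then ret ++ kv.2.toList ++ [' '] else ret) ret) []
  String.ofList (PySem.List.slice ret none (some (-1)))

-- ===== PORT B =====
def alphabet_position_alt (text : String) : String :=
  PySem.Str.join " " ((PySem.Str.lower text).toList.filterMap (fun c =>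
    if 'a' ≤ c ∧ c ≤ 'z' then some (PySem.Int.toStr ((c.toNat : Int) - 96)) else none))

-- ===== PRECONDITION & SPEC =====
def Spec_alphabet_position (text : String) (out : String) : Prop := out = alphabet_position_alt text
instance (text : String) (out : String) : Decidable (Spec_alphabet_position text out) := by unfold Spec_alphabet_position; infer_instance

-- ===== CLAIM (what is proved, stated in full; the proofs are below) =====
def Claim_equal_alphabet_position : Prop := ∀ (text : String), Dom_alphabet_position text → Spec_alphabet_position text (alphabet_position text)

-- ===== LEMMAS AND PROOFS =====

-- what one character contributes to A's inner dict scan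
def pvEntry (c : Char) : List Char :=
  if 'a' ≤ c ∧ c ≤ 'z' then PySem.Int.toChars ((c.toNat : Int) - 96) ++ [' '] else []

-- B's per-character part
def pvPart (c : Char) : Option (List Char) :=
  if 'a' ≤ c ∧ c ≤ 'z' then some (PySem.Int.toChars ((c.toNat : Int) - 96)) else none

theorem pvFlat_of_lt (n : Nat) (h : n < 127) :
    pvAlphaDict.flatMap
      (fun kv => if kv.1 == String.ofList [Char.ofNat n] then kv.2.toList ++ [' '] else []) =
      pvEntry (Char.ofNat n) := by
  revert h
  revert n
  decide

theorem pvInner (c : Char) (h : c.toNat < 127) (ret : List Char) :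
    pvAlphaDict.foldl (fun ret kv =>
        if kv.1 == String.ofList [c] then ret ++ kv.2.toList ++ [' '] else ret) ret
      = ret ++ pvEntry c := by
  have hfun : ∀ (r : List Char) (kv : String × String),
      (if kv.1 == String.ofList [c] then r ++ kv.2.toList ++ [' '] else r)
        = r ++ (if kv.1 == String.ofList [c] then kv.2.toList ++ [' '] else []) := by
    intro r kv; split <;> simp
  calc pvAlphaDict.foldl (fun ret kv =>
        if kv.1 == String.ofList [c] then ret ++ kv.2.toList ++ [' '] else ret) ret
      = pvAlphaDict.foldl (fun ret kv =>
        ret ++ (if kv.1 == String.ofList [c] then kv.2.toList ++ [' '] else [])) ret := by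
        exact PySem.List.foldl_congr_mem _ _ _ _ (fun r kv _ => hfun r kv)
    _ = ret ++ pvAlphaDict.flatMap
        (fun kv => if kv.1 == String.ofList [c] then kv.2.toList ++ [' '] else []) :=
        PySem.List.foldl_append_eq_flatMap _ _ _
    _ = ret ++ pvEntry c := by
        have := pvFlat_of_lt c.toNat h
        rw [Char.ofNat_toNat] at this
        rw [this]

theorem pvLowerChar_lt (c : Char) (h : c.toNat < 127) :
    (PySem.Chars.lowerChar c).toNat < 127 := by
  have key : ∀ n, n < 127 → (PySem.Chars.lowerChar (Char.ofNat n)).toNat < 127 := by decide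
  have := key c.toNat h
  rwa [Char.ofNat_toNat] at this

-- flatMap of entries = flatten of the space-suffixed parts
theorem pvFlatMap_eq (cs : List Char) :
    cs.flatMap pvEntry = ((cs.filterMap pvPart).map (· ++ [' '])).flatten := by
  induction cs with
  | nil => rfl
  | cons c cs ih =>
    by_cases hc : 'a' ≤ c ∧ c ≤ 'z' <;>
      simp [pvEntry, pvPart, hc, ih]

-- dropping the trailing space of the flattened space-suffixed parts is join with " "
theorem pvDropLast_flatten (ps : List (List Char)) :
    ((ps.map (· ++ [' '])).flatten).dropLast = PySem.Chars.join [' '] ps := by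
  induction ps with
  | nil => rfl
  | cons p ps ih =>
    cases ps with
    | nil => simp [PySem.Chars.join_singleton]
    | cons q rest =>
      have hne : ((List.map (· ++ [' ']) (q :: rest)).flatten) ≠ [] := by
        simp
      calc ((List.map (· ++ [' ']) (p :: q :: rest)).flatten).dropLast
          = ((p ++ [' ']) ++ (List.map (· ++ [' ']) (q :: rest)).flatten).dropLast := by simp
        _ = (p ++ [' ']) ++ ((List.map (· ++ [' ']) (q :: rest)).flatten).dropLast :=
            List.dropLast_append_of_ne_nil hne
        _ = PySem.Chars.join [' '] (p :: q :: rest) := by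
            rw [ih, PySem.Chars.join_cons_cons]

-- ===== VERDICT (by name: the statement is the Claim_ definition above) =====
theorem alphabet_position_spec : Claim_equal_alphabet_position := by
  intro text hdom
  unfold Spec_alphabet_position alphabet_position alphabet_position_alt
  have hchars : ∀ c ∈ (PySem.Str.lower text).toList, c.toNat < 127 := by
    intro c hc
    rw [PySem.Str.toList_lower] at hc
    unfold PySem.Chars.lower at hc
    rcases List.mem_map.mp hc with ⟨x, hx, rfl⟩
    have hd : pvDomChar x = true := by
      have := (List.all_eq_true.mp hdom) x hx
      exact this
    have hx127 : x.toNat < 127 := by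
      unfold pvDomChar at hd
      simp at hd
      omega
    exact pvLowerChar_lt x hx127
  set cs := (PySem.Str.lower text).toList with hcs
  -- outer loop: replace each inner scan by its closed contribution, then flatten
  have houter :
      cs.foldl (fun ret ch =>
        pvAlphaDict.foldl (fun ret kv =>
          if kv.1 == String.ofList [ch] then ret ++ kv.2.toList ++ [' '] else ret) ret) []
        = cs.flatMap pvEntry := by
    have := PySem.List.foldl_congr_mem cs
      (fun ret ch =>
        pvAlphaDict.foldl (fun ret kv =>
          if kv.1 == String.ofList [ch] then ret ++ kv.2.toList ++ [' '] else ret) ret)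
      (fun ret ch => ret ++ pvEntry ch) []
      (fun acc x hx => pvInner x (hchars x hx) acc)
    rw [this, PySem.List.foldl_append_eq_flatMap]
    simp
  rw [houter]
  show String.ofList (PySem.List.slice (cs.flatMap pvEntry) none (some (-1))) = _
  rw [PySem.List.slice_to_neg_one, pvFlatMap_eq, pvDropLast_flatten]
  -- align B's parts (Strings) with the List Char parts
  have hparts :
      (cs.filterMap (fun c =>
        if 'a' ≤ c ∧ c ≤ 'z' then some (PySem.Int.toStr ((c.toNat : Int) - 96)) else none)).map
          String.toList = cs.filterMap pvPart := by
    induction cs with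
    | nil => rfl
    | cons c cs ih =>
      by_cases hc : 'a' ≤ c ∧ c ≤ 'z' <;>
        simp [pvPart, hc, ih, PySem.Int.toList_toStr]
  apply String.toList_injective
  rw [PySem.Str.toList_join]
  simp [hparts]
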